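-- pv_equiv track=rewrite | github.com/CleepDevice/cleep | raspiot/libs/configs/dhcpcdconf.py | __cidr_to_netmask
-- ===== SOURCE A (Python) =====
-- def __cidr_to_netmask(cidr):
--     """
--     Convert cidr to netmask
--
--     Note:
--         http://www.linuxquestions.org/questions/blog/bittner-195120/cidr-to-netmask-conversion-with-python-convert-short-netmask-to-long-dotted-format-3147/
--
--     Args:
--         cidr (int): cidr value
--
--     Returns:
--         string: netmask (ie 255.255.255.0)
--     """
--     mask = ''
--     if not isinstance(cidr, int) or cidr<0 or cidr>32: # pragma: no cover
--         return None
--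
--     for t in range(4):
--         if cidr>7:
--             mask += '255.'
--         else:
--             dec = 255 - (2**(8 - cidr) - 1)
--             mask += str(dec) + '.'
--         cidr -= 8
--         if cidr< 0:
--             cidr = 0
--
--     return mask[:-1]
-- ===== SOURCE B (Python) =====
-- def __cidr_to_netmask(cidr):
--     if not isinstance(cidr, int) or cidr < 0 or cidr > 32:
--         return None
--     mask = ((1 << cidr) - 1) << (32 - cidr)
--     return '.'.join(str((mask >> (24 - 8 * i)) & 255) for i in range(4))
-- ===== Notes on version B (the rewrite author's own statement) =====
-- stated objective: simpler
-- what changed: B builds the whole 32-bit mask as one integer with shifts and decomposes it into four bytes, replacing A's per-octet decrement-and-branch loop and trailing-dot trimming.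
import Mathlib
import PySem

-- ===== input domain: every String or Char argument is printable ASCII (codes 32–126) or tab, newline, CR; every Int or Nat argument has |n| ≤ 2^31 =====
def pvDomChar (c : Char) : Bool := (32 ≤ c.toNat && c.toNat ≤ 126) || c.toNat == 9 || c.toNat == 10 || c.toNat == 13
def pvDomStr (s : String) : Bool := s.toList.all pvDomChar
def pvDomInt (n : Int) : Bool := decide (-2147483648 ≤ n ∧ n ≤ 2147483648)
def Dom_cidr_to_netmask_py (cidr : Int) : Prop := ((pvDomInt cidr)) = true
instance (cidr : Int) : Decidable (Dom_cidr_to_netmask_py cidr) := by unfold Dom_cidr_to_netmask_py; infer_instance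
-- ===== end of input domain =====

-- B builds the 32-bit mask as one integer and decomposes it into bytes, instead of A's per-octet decrement-and-branch loop (objective: simpler).

-- ===== PORT A =====
-- Literal port of A: the growing string mask is carried as its List Char (string += is list append,
-- exact for strings); per iteration append '255.' or the computed octet + '.', decrement cidr by 8
-- and clamp at 0; finally mask[:-1] (PySem.List.slice … (some (-1))) trims the trailing dot.
def cidr_to_netmask_py (cidr : Int) : Option String :=
  if ¬ (cidr < 0 ∨ cidr > 32) then
    let st := (List.range 4).foldl (fun (st : List Char × Int) _ =>
      let mask := st.1
      let c := st.2
      let mask :=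
        if c > 7 then mask ++ "255.".toList
        else
          -- 2**(8 - cidr): here 0 ≤ c ≤ 7 always holds, so the exponent (8 - c) is a nonneg int
          let dec : Int := 255 - ((2 : Int) ^ (8 - c).toNat - 1)
          mask ++ PySem.Int.toChars dec ++ ".".toList
      let c := c - 8
      let c := if c < 0 then (0 : Int) else c
      (mask, c)) ([], cidr)
    some (String.ofList (PySem.List.slice st.1 none (some (-1))))
  else none

-- ===== PORT B =====
-- Literal port of B: mask = ((1 << cidr) - 1) << (32 - cidr); each byte by shift-and-mask, joined with '.'.
def cidr_to_netmask_py_alt (cidr : Int) : Option String :=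
  if ¬ (cidr < 0 ∨ cidr > 32) then
    -- 0 ≤ cidr ≤ 32 here, so mask and every intermediate is nonneg: Nat shifts/and are exact
    let mask : Nat := ((1 <<< cidr.toNat) - 1) <<< (32 - cidr).toNat
    some (PySem.Str.join "." ((List.range 4).map
      (fun i => PySem.Int.toStr (((mask >>> (24 - 8 * i)) &&& 255 : Nat) : Int))))
  else none

-- ===== PRECONDITION & SPEC =====
def Spec_cidr_to_netmask_py (cidr : Int) (out : Option String) : Prop := out = cidr_to_netmask_py_alt cidr
instance (cidr : Int) (out : Option String) : Decidable (Spec_cidr_to_netmask_py cidr out) := by unfold Spec_cidr_to_netmask_py; infer_instance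

-- ===== CLAIM (what is proved, stated in full; the proofs are below) =====
def Claim_equal_cidr_to_netmask_py : Prop := ∀ (cidr : Int), Dom_cidr_to_netmask_py cidr → Spec_cidr_to_netmask_py cidr (cidr_to_netmask_py cidr)

-- ===== LEMMAS AND PROOFS =====

-- ===== VERDICT (by name: the statement is the Claim_ definition above) =====
theorem cidr_to_netmask_py_spec : Claim_equal_cidr_to_netmask_py := by
  intro cidr _
  unfold Spec_cidr_to_netmask_py
  by_cases h : cidr < 0 ∨ cidr > 32
  · simp [cidr_to_netmask_py, cidr_to_netmask_py_alt, h]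
  · push Not at h
    obtain ⟨h1, h2⟩ := h
    interval_cases cidr <;> decide
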